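-- pv_equiv track=rewrite | github.com/pypi-data/pypi-mirror-275 | packages/number2text/number2text-0.0.1.tar.gz/number2text-0.0.1/number2text/lang/ta.py | convert_less_than_thousand
-- ===== SOURCE A (Python) =====
-- _ones= ["", "ஒன்று", "இரண்டு", "மூன்று", "நான்கு", "ஐந்து", "ஆறு", "ஏழு", "எட்டு", "ஒன்பது"]
--
-- _teens = ["பத்து", "பதினொன்று", "பன்னிரண்டு", "பதின்மூன்று", "பதினான்கு", "பதினைந்து", "பதினாறு", "பதினேழு", "பதினெட்டு", "பத்தொன்பது"]
--
-- _tens = ["", "", "இருபது", "முப்பது", "நாற்பது", "ஐம்பது", "அறுபது", "எழுபது", "எண்பது", "தொண்ணூறு"]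
--
-- _hundreds = ["", "நூறு", "இருநூறு", "முந்நூறு", "நாநூறு", "ஐநூறு", "அறுநூறு", "எழுநூறு", "எண்ணூறு", "தொள்ளாயிரம்"]
--
-- def convert_less_than_thousand(number):
--     if number < 10:
--         return _ones[number]
--     elif number < 20:
--         return _teens[number - 10]
--     elif number < 100:
--         tens, ones = divmod(number, 10)
--         if ones == 0:
--             return _tens[tens]
--         else:
--             return _tens[tens] + " " + _ones[ones]
--     else:
--         hundreds, less_than_hundred = divmod(number, 100)
--         if less_than_hundred == 0:
--             return _hundreds[hundreds]
--         else:
--             return _hundreds[hundreds] + " " + convert_less_than_thousand(less_than_hundred)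
-- ===== SOURCE B (Python) =====
-- # Non-recursive re-implementation: flat divmod-by-100 decomposition assembling parts and joining.
-- _ones = ["", "ஒன்று", "இரண்டு", "மூன்று", "நான்கு", "ஐந்து", "ஆறு", "ஏழு", "எட்டு", "ஒன்பது"]
--
-- _teens = ["பத்து", "பதினொன்று", "பன்னிரண்டு", "பதின்மூன்று", "பதினான்கு", "பதினைந்து", "பதினாறு", "பதினேழு", "பதினெட்டு", "பத்தொன்பது"]
--
-- _tens = ["", "", "இருபது", "முப்பது", "நாற்பது", "ஐம்பது", "அறுபது", "எழுபது", "எண்பது", "தொண்ணூறு"]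
--
-- _hundreds = ["", "நூறு", "இருநூறு", "முந்நூறு", "நாநூறு", "ஐநூறு", "அறுநூறு", "எழுநூறு", "எண்ணூறு", "தொள்ளாயிரம்"]
--
-- def convert_less_than_thousand(number):
--     if number < 10:
--         return _ones[number]
--     if number < 20:
--         return _teens[number - 10]
--     hundreds, rem = divmod(number, 100)
--     parts = []
--     if hundreds > 0:
--         parts.append(_hundreds[hundreds])
--     if rem > 0:
--         if rem < 10:
--             parts.append(_ones[rem])
--         elif rem < 20:
--             parts.append(_teens[rem - 10])
--         else:
--             t, o = divmod(rem, 10)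
--             parts.append(_tens[t] if o == 0 else _tens[t] + " " + _ones[o])
--     return " ".join(parts)
-- ===== Notes on version B (the rewrite author's own statement) =====
-- stated objective: alternative
-- what changed: Replaces the recursive self-call for the sub-hundred part with a flat single-pass divmod(number,100) decomposition that appends parts to a list and joins them with ' '.
import Mathlib
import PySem

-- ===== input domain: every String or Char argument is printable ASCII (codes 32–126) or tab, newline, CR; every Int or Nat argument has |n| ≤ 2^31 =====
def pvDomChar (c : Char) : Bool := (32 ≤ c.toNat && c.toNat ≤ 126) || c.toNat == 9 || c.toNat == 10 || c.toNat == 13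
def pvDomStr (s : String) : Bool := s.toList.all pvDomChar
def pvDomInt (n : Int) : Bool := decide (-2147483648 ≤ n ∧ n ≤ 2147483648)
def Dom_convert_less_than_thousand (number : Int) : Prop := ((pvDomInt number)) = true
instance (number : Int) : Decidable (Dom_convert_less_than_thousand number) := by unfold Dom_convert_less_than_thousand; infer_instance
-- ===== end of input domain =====

-- B replaces A's recursive self-call with a flat divmod-by-100 parts-list assembly (alternative decomposition, same cost).

-- shared constant tables (module-level lists in the Python source)
def tamilOnes : List String := ["", "ஒன்று", "இரண்டு", "மூன்று", "நான்கு", "ஐந்து", "ஆறு", "ஏழு", "எட்டு", "ஒன்பது"]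
def tamilTeens : List String := ["பத்து", "பதினொன்று", "பன்னிரண்டு", "பதின்மூன்று", "பதினான்கு", "பதினைந்து", "பதினாறு", "பதினேழு", "பதினெட்டு", "பத்தொன்பது"]
def tamilTens : List String := ["", "", "இருபது", "முப்பது", "நாற்பது", "ஐம்பது", "அறுபது", "எழுபது", "எண்பது", "தொண்ணூறு"]
def tamilHundreds : List String := ["", "நூறு", "இருநூறு", "முந்நூறு", "நாநூறு", "ஐநூறு", "அறுநூறு", "எழுநூறு", "எண்ணூறு", "தொள்ளாயிரம்"]

-- ===== PORT A =====
-- list indexing (incl. negative wrap) via pyGetD; Pre_ keeps every index in range, so the default is never read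
def convert_less_than_thousand (number : Int) : String :=
  if number < 10 then PySem.List.pyGetD tamilOnes number ""
  else if number < 20 then PySem.List.pyGetD tamilTeens (number - 10) ""
  else if number < 100 then
    let tens := PySem.Int.floordiv number 10
    let ones := PySem.Int.mod number 10
    if ones = 0 then PySem.List.pyGetD tamilTens tens ""
    else PySem.List.pyGetD tamilTens tens "" ++ " " ++ PySem.List.pyGetD tamilOnes ones ""
  else
    let hundreds := PySem.Int.floordiv number 100
    let less_than_hundred := PySem.Int.mod number 100
    if less_than_hundred = 0 then PySem.List.pyGetD tamilHundreds hundreds ""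
    else PySem.List.pyGetD tamilHundreds hundreds "" ++ " " ++ convert_less_than_thousand less_than_hundred
termination_by number.toNat
decreasing_by
  have h1 := PySem.Int.mod_nonneg number (b := 100) (by norm_num)
  have h2 := PySem.Int.mod_lt number (b := 100) (by norm_num)
  omega

-- ===== PORT B =====
def convert_less_than_thousand_alt (number : Int) : String :=
  if number < 10 then PySem.List.pyGetD tamilOnes number ""
  else if number < 20 then PySem.List.pyGetD tamilTeens (number - 10) ""
  else
    let hundreds := PySem.Int.floordiv number 100
    let rem := PySem.Int.mod number 100
    let parts : List String :=
      if hundreds > 0 then [PySem.List.pyGetD tamilHundreds hundreds ""] else []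
    let parts : List String :=
      if rem > 0 then
        parts ++ [if rem < 10 then PySem.List.pyGetD tamilOnes rem ""
                  else if rem < 20 then PySem.List.pyGetD tamilTeens (rem - 10) ""
                  else
                    let t := PySem.Int.floordiv rem 10
                    let o := PySem.Int.mod rem 10
                    if o = 0 then PySem.List.pyGetD tamilTens t ""
                    else PySem.List.pyGetD tamilTens t "" ++ " " ++ PySem.List.pyGetD tamilOnes o ""]
      else parts
    PySem.Str.join " " parts

-- ===== PRECONDITION & SPEC =====
-- Pre_ excludes exactly the inputs where A raises IndexError (number ≤ -10 or number ≥ 1000)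
def Pre_convert_less_than_thousand (number : Int) : Prop := -9 ≤ number ∧ number < 1000
instance (number : Int) : Decidable (Pre_convert_less_than_thousand number) := by unfold Pre_convert_less_than_thousand; infer_instance
def pvWitness_convert_less_than_thousand : Int := (123)
def Spec_convert_less_than_thousand (number : Int) (out : String) : Prop := out = convert_less_than_thousand_alt number
instance (number : Int) (out : String) : Decidable (Spec_convert_less_than_thousand number out) := by unfold Spec_convert_less_than_thousand; infer_instance

-- ===== CLAIM (what is proved, stated in full; the proofs are below) =====
def Claim_equal_convert_less_than_thousand : Prop := ∀ (number : Int), Dom_convert_less_than_thousand number → Pre_convert_less_than_thousand number → Spec_convert_less_than_thousand number (convert_less_than_thousand number)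

-- ===== LEMMAS AND PROOFS =====

theorem str_join_one (a : String) : PySem.Str.join " " [a] = a := by
  apply String.toList_inj.mp
  simp [PySem.Str.toList_join, PySem.Chars.join_singleton]

theorem str_join_two (a b : String) : PySem.Str.join " " [a, b] = a ++ " " ++ b := by
  apply String.toList_inj.mp
  simp [PySem.Str.toList_join, PySem.Chars.join_cons_cons, PySem.Chars.join_singleton]

theorem floordiv100_small {n : Int} (h0 : 0 ≤ n) (h : n < 100) : PySem.Int.floordiv n 100 = 0 := by
  rw [PySem.Int.floordiv_eq_iff_of_pos (by norm_num)]
  omega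

theorem mod100_small {n : Int} (h0 : 0 ≤ n) (h : n < 100) : PySem.Int.mod n 100 = n := by
  have := PySem.Int.floordiv_mul_add_mod n 100
  have hq := floordiv100_small h0 h
  omega

-- ===== VERDICT (by name: the statement is the Claim_ definition above) =====
theorem convert_less_than_thousand_spec : Claim_equal_convert_less_than_thousand := by
  intro number _ hpre
  obtain ⟨hlo, hhi⟩ := hpre
  unfold Spec_convert_less_than_thousand
  by_cases h10 : number < 10
  · rw [convert_less_than_thousand, convert_less_than_thousand_alt]
    simp [h10]
  · by_cases h20 : number < 20
    · rw [convert_less_than_thousand, convert_less_than_thousand_alt]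
      simp [h10, h20]
    · by_cases h100 : number < 100
      · -- 20 ≤ number < 100: B has hundreds = 0, rem = number
        rw [convert_less_than_thousand, convert_less_than_thousand_alt]
        have hq := floordiv100_small (by omega) h100
        have hr := mod100_small (by omega : (0:Int) ≤ number) h100
        simp only [h10, h20, h100, if_false, if_true, hq, hr]
        have hpos : ¬ ((0:Int) > 0) := by omega
        have hnpos : number > 0 := by omega
        simp only [hpos, if_false, hnpos, if_true, List.nil_append]
        rw [str_join_one]
      · -- 100 ≤ number < 1000
        rw [convert_less_than_thousand, convert_less_than_thousand_alt]
        have hmn := PySem.Int.mod_nonneg number (b := 100) (by norm_num)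
        have hml := PySem.Int.mod_lt number (b := 100) (by norm_num)
        have hdpos : 0 < PySem.Int.floordiv number 100 := by
          have := PySem.Int.floordiv_mul_add_mod number 100
          nlinarith
        simp only [h10, h20, h100, if_false]
        set h := PySem.Int.floordiv number 100 with hh
        set r := PySem.Int.mod number 100 with hr
        by_cases hr0 : r = 0
        · rw [if_pos hr0, if_neg (by omega : ¬ r > 0), if_pos hdpos, str_join_one]
        · rw [if_neg hr0, if_pos (by omega : r > 0), if_pos hdpos, List.singleton_append, str_join_two]
          -- expand the recursive call on r (0 < r < 100)
          rw [convert_less_than_thousand]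
          by_cases hr10 : r < 10
          · simp [hr10]
          · by_cases hr20 : r < 20
            · simp [hr10, hr20]
            · simp [hr10, hr20, (by omega : r < 100)]
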